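-- pv_equiv track=rewrite | github.com/chip2n/facebook-hackercup2016 | price.py | sequence_from_start
-- ===== SOURCE A (Python) =====
-- def sequence_from_start(max_price, xs):
--     sequences = []
--     current_sequence = []
--     for x in xs:
--         current_sequence.append(x)
--         if sum(current_sequence) <= max_price:
--             sequences.append(current_sequence[:])
--         else:
--             break;
--
--     return sequences
-- ===== SOURCE B (Python) =====
-- def sequence_from_start(max_price, xs):
--     # Pass 1: length k of the longest affordable prefix, via one running sum.
--     total = 0
--     k = 0
--     for x in xs:
--         total += x
--         if total > max_price:
--             break
--         k += 1
--     # Pass 2: build the answer BACK-TO-FRONT by shrinking the longest prefix,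
--     # then reverse; no per-step re-summing or slicing of xs.
--     prefix = list(xs[:k])
--     out = []
--     while prefix:
--         out.append(prefix[:])
--         prefix.pop()
--     out.reverse()
--     return out
-- ===== Notes on version B (the rewrite author's own statement) =====
-- stated objective: alternative
-- what changed: B first finds the longest affordable prefix with one running-sum pass, then builds the result back-to-front by repeatedly popping the last element of that prefix and reversing at the end, instead of A's forward extend-copy-and-rescan loop.
import Mathlib
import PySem

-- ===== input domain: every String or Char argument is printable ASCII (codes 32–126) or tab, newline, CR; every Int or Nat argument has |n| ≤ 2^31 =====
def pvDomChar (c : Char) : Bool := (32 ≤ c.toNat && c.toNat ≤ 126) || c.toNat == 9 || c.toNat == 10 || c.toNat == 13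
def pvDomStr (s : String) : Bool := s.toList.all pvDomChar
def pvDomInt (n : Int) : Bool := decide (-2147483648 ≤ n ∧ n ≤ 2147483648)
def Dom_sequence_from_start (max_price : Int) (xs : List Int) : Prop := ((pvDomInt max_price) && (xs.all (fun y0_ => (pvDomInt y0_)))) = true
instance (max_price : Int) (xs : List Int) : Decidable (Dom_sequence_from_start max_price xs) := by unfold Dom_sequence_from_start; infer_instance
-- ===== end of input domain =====

-- B finds the longest affordable prefix with one running sum and then builds the answer back-to-front by popping and reversing, instead of A's forward extend-copy-and-rescan loop; same return value, proved equal.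


-- ===== PORT A =====
-- the for-loop with its break: state is current_sequence; each step appends x,
-- re-sums the whole current_sequence, and either records a copy or stops
def goA (max_price : Int) : List Int → List Int → List (List Int)
  | [], _ => []
  | x :: rest, cur =>
      let cur' := cur ++ [x]
      if cur'.sum ≤ max_price then cur' :: goA max_price rest cur' else []

def sequence_from_start (max_price : Int) (xs : List Int) : List (List Int) :=
  goA max_price xs []

-- ===== PORT B =====
-- pass 1 of Source B: running total, count steps until the total exceeds max_price
def altCutoff (max_price : Int) : List Int → Int → Nat
  | [], _ => 0
  | x :: rest, total =>
      let t := total + x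
      if t > max_price then 0 else 1 + altCutoff max_price rest t

-- pass 2 of Source B: 'while prefix: out.append(prefix[:]); prefix.pop()'
def altShrink : List Int → List (List Int)
  | [] => []
  | x :: t => (x :: t) :: altShrink (x :: t).dropLast
  termination_by p => p.length
  decreasing_by simp only [List.length_dropLast, List.length_cons]; omega

def sequence_from_start_alt (max_price : Int) (xs : List Int) : List (List Int) :=
  (altShrink (xs.take (altCutoff max_price xs 0))).reverse

-- ===== PRECONDITION & SPEC =====
def Spec_sequence_from_start (max_price : Int) (xs : List Int) (out : List (List Int)) : Prop := out = sequence_from_start_alt max_price xs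
instance (max_price : Int) (xs : List Int) (out : List (List Int)) : Decidable (Spec_sequence_from_start max_price xs out) := by unfold Spec_sequence_from_start; infer_instance

-- ===== CLAIM (what is proved, stated in full; the proofs are below) =====
def Claim_equal_sequence_from_start : Prop := ∀ (max_price : Int) (xs : List Int), Dom_sequence_from_start max_price xs → Spec_sequence_from_start max_price xs (sequence_from_start max_price xs)

-- ===== LEMMAS AND PROOFS =====

-- loop invariant for A: the loop over `rest` with accumulator `cur` returns the
-- slices of `rest` up to B's cutoff, each prefixed by `cur`
theorem goA_eq (max_price : Int) (xs : List Int) :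
    ∀ cur : List Int,
      goA max_price xs cur =
        (List.range (altCutoff max_price xs cur.sum)).map (fun i => cur ++ xs.take (i + 1)) := by
  induction xs with
  | nil => intro cur; simp [goA, altCutoff]
  | cons x rest ih =>
      intro cur
      simp only [goA, altCutoff]
      by_cases h : cur.sum + x > max_price
      · rw [if_neg (by simp; omega), if_pos (by simpa using h)]
        simp
      · rw [if_pos (by simp; omega), if_neg h]
        rw [ih (cur ++ [x])]
        rw [Nat.add_comm 1, List.range_succ_eq_map]
        simp [List.map_map, Function.comp]

-- B's shrink loop lists the nonempty prefixes of p, longest first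
theorem altShrink_eq (p : List Int) :
    altShrink p = ((List.range p.length).map (fun i => p.take (i + 1))).reverse := by
  induction hn : p.length generalizing p with
  | zero => cases p with
      | nil => rw [altShrink]; simp
      | cons a t => simp at hn
  | succ n ih =>
      cases p with
      | nil => simp at hn
      | cons a t =>
        rw [altShrink, ih (a :: t).dropLast (by simp at hn ⊢; omega), List.range_succ]
        simp only [List.map_append, List.reverse_append, List.map_cons, List.map_nil]
        simp only [List.reverse_cons, List.reverse_nil, List.nil_append, List.cons_append]
        have htake : ∀ i : ℕ, i ∈ List.range n → (a :: t).dropLast.take (i + 1) = (a :: t).take (i + 1) := by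
          intro i hi
          rw [List.mem_range] at hi
          rw [List.dropLast_eq_take, List.take_take]
          congr 1
          simp only [List.length_cons] at hn ⊢; omega
        rw [List.map_congr_left htake]
        congr 1
        have : n + 1 = (a :: t).length := hn.symm
        rw [this, List.take_length]

-- the cutoff never exceeds the list length
theorem altCutoff_le (max_price : Int) (xs : List Int) :
    ∀ total : Int, altCutoff max_price xs total ≤ xs.length := by
  induction xs with
  | nil => intro total; simp [altCutoff]
  | cons x rest ih =>
      intro total
      simp only [altCutoff, List.length_cons]
      split
      · omega
      · have := ih (total + x); omega

-- ===== VERDICT (by name: the statement is the Claim_ definition above) =====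
theorem sequence_from_start_spec : Claim_equal_sequence_from_start := by
  intro max_price xs _
  unfold Spec_sequence_from_start sequence_from_start sequence_from_start_alt
  rw [altShrink_eq, List.reverse_reverse]
  rw [goA_eq]
  simp only [List.sum_nil, List.nil_append]
  rw [List.length_take_of_le (altCutoff_le max_price xs 0)]
  apply List.map_congr_left
  intro i hi
  rw [List.mem_range] at hi
  rw [List.take_take]
  congr 1
  omega
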